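-- pv_equiv track=rewrite | github.com/fenderglass/svim-asm | src/svim_asm/SVIM_intra.py | analyze_cigar_indel
-- ===== SOURCE A (Python) =====
-- def analyze_cigar_indel(tuples, min_length):
--     """Parses CIGAR tuples (op, len) and returns Indels with a length > minLength"""
--     pos_ref = 0
--     pos_read = 0
--     indels = []
--     for operation, length in tuples:
--         if operation == 0:                     # alignment match
--             pos_ref += length
--             pos_read += length
--         elif operation == 1:                   # insertion
--             if length >= min_length:
--                 indels.append((pos_ref, pos_read, length, "INS"))
--             pos_read += length
--         elif operation == 2:                   # deletion
--             if length >= min_length: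
--                 indels.append((pos_ref, pos_read, length, "DEL"))
--             pos_ref += length
--         elif operation == 4:                   # soft clip
--             pos_read += length
--         elif operation == 7 or operation == 8:        # match or mismatch
--             pos_ref += length
--             pos_read += length
--     return indels
-- ===== SOURCE B (Python) =====
-- def analyze_cigar_indel(tuples, min_length):
--     """Parses CIGAR tuples (op, len) and returns Indels with a length > minLength"""
--     ref_ops = {0, 2, 7, 8}
--     read_ops = {0, 1, 4, 7, 8}
--     # pass 1: positions preceding each tuple
--     ref_pos = []
--     read_pos = []
--     r = q = 0
--     for op, ln in tuples:
--         ref_pos.append(r)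
--         read_pos.append(q)
--         if op in ref_ops:
--             r += ln
--         if op in read_ops:
--             q += ln
--     # pass 2: collect large indels
--     return [(ref_pos[i], read_pos[i], ln, "INS" if op == 1 else "DEL")
--             for i, (op, ln) in enumerate(tuples)
--             if op in (1, 2) and ln >= min_length]
-- ===== Notes on version B (the rewrite author's own statement) =====
-- stated objective: alternative
-- what changed: B separates the computation into two passes: a first pass accumulates the ref/read positions preceding each tuple into parallel lists, then a single comprehension over enumerate(tuples) selects the large indels; A interleaves position updates and appending in one stateful loop with a branch per op code.
import Mathlib
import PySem

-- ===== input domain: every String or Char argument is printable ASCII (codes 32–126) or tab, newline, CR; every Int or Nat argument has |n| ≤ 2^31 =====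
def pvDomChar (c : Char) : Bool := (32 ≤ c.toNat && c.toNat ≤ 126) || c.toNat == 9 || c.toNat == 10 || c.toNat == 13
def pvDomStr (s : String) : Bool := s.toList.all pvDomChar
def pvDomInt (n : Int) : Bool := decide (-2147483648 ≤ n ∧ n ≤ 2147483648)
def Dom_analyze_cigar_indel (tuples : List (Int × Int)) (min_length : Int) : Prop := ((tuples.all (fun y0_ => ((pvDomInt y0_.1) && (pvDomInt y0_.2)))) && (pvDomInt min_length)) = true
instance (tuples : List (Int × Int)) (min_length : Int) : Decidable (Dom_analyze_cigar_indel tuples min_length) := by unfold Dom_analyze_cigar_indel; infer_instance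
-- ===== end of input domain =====

-- ===== PORT A =====
-- B restructures A's single stateful loop into two passes (prefix positions, then a selection pass); same O(n) cost.
def acirStep (min_length : Int) (st : Int × Int × List (Int × Int × Int × String)) (t : Int × Int) :
    Int × Int × List (Int × Int × Int × String) :=
  let (pos_ref, pos_read, indels) := st
  let (operation, length) := t
  if operation = 0 then (pos_ref + length, pos_read + length, indels)
  else if operation = 1 then
    (pos_ref, pos_read + length,
      if min_length ≤ length then indels ++ [(pos_ref, pos_read, length, "INS")] else indels)
  else if operation = 2 then
    (pos_ref + length, pos_read,
      if min_length ≤ length then indels ++ [(pos_ref, pos_read, length, "DEL")] else indels)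
  else if operation = 4 then (pos_ref, pos_read + length, indels)
  else if operation = 7 ∨ operation = 8 then (pos_ref + length, pos_read + length, indels)
  else (pos_ref, pos_read, indels)

def analyze_cigar_indel (tuples : List (Int × Int)) (min_length : Int) : List (Int × Int × Int × String) :=
  (tuples.foldl (acirStep min_length) (0, 0, [])).2.2

-- ===== PORT B =====
-- pass 1 of Source B: the (ref, read) positions preceding each tuple
def acirPrefixes : List (Int × Int) → Int → Int → List (Int × Int)
  | [], _, _ => []
  | (op, ln) :: rest, r, q =>
      (r, q) :: acirPrefixes rest
        (if op = 0 ∨ op = 2 ∨ op = 7 ∨ op = 8 then r + ln else r)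
        (if op = 0 ∨ op = 1 ∨ op = 4 ∨ op = 7 ∨ op = 8 then q + ln else q)

def analyze_cigar_indel_alt (tuples : List (Int × Int)) (min_length : Int) : List (Int × Int × Int × String) :=
  (tuples.zip (acirPrefixes tuples 0 0)).filterMap
    (fun x =>
      let ((op, ln), (r, q)) := x
      if (op = 1 ∨ op = 2) ∧ min_length ≤ ln then
        some (r, q, ln, if op = 1 then "INS" else "DEL")
      else none)

-- ===== PRECONDITION & SPEC =====
def Spec_analyze_cigar_indel (tuples : List (Int × Int)) (min_length : Int) (out : List (Int × Int × Int × String)) : Prop := out = analyze_cigar_indel_alt tuples min_length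
instance (tuples : List (Int × Int)) (min_length : Int) (out : List (Int × Int × Int × String)) : Decidable (Spec_analyze_cigar_indel tuples min_length out) := by unfold Spec_analyze_cigar_indel; infer_instance

-- ===== CLAIM (what is proved, stated in full; the proofs are below) =====
def Claim_equal_analyze_cigar_indel : Prop := ∀ (tuples : List (Int × Int)) (min_length : Int), Dom_analyze_cigar_indel tuples min_length → Spec_analyze_cigar_indel tuples min_length (analyze_cigar_indel tuples min_length)

-- ===== LEMMAS AND PROOFS =====
theorem acir_fold_eq (min_length : Int) :
    ∀ (tuples : List (Int × Int)) (r q : Int) (acc : List (Int × Int × Int × String)),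
    (tuples.foldl (acirStep min_length) (r, q, acc)).2.2 =
      acc ++ (tuples.zip (acirPrefixes tuples r q)).filterMap
        (fun x =>
          let ((op, ln), (rr, qq)) := x
          if (op = 1 ∨ op = 2) ∧ min_length ≤ ln then
            some (rr, qq, ln, if op = 1 then "INS" else "DEL")
          else none)
  | [], r, q, acc => by simp
  | (op, ln) :: rest, r, q, acc => by
    by_cases h0 : op = 0
    · simp [acirPrefixes, acirStep, h0, acir_fold_eq min_length rest]
    · by_cases h1 : op = 1
      · by_cases hl : min_length ≤ ln
        · simp [acirPrefixes, acirStep, h0, h1, hl, acir_fold_eq min_length rest]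
        · simp [acirPrefixes, acirStep, h0, h1, hl, acir_fold_eq min_length rest]
      · by_cases h2 : op = 2
        · by_cases hl : min_length ≤ ln
          · simp [acirPrefixes, acirStep, h0, h1, h2, hl, acir_fold_eq min_length rest]
          · simp [acirPrefixes, acirStep, h0, h1, h2, hl, acir_fold_eq min_length rest]
        · by_cases h4 : op = 4
          · simp [acirPrefixes, acirStep, h0, h1, h2, h4, acir_fold_eq min_length rest]
          · by_cases h78 : op = 7 ∨ op = 8
            · simp [acirPrefixes, acirStep, h0, h1, h2, h4, h78, acir_fold_eq min_length rest]
            · simp [acirPrefixes, acirStep, h0, h1, h2, h4, h78,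
                acir_fold_eq min_length rest]

-- ===== VERDICT (by name: the statement is the Claim_ definition above) =====
theorem analyze_cigar_indel_spec : Claim_equal_analyze_cigar_indel := by
  intro tuples min_length _
  unfold Spec_analyze_cigar_indel analyze_cigar_indel analyze_cigar_indel_alt
  simp [acir_fold_eq]
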